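-- pv_equiv track=rewrite | github.com/grakoczy/RP6502-raycasting-llvm-mos | textures/convert_sprites_to_bin.py | build_opacity_masks
-- ===== SOURCE A (Python) =====
-- def build_opacity_masks(texture, texture_size, transparent_index=0x21):
--     """Build per-column 16-bit opacity masks (bit y == 1 means opaque)."""
--     width, height = texture_size
--     masks = []
--     for x in range(width):
--         mask = 0
--         for y in range(height):
--             pixel = texture[y * width + x]
--             if pixel != transparent_index:
--                 mask |= (1 << y)
--         masks.append(mask)
--     return masks
-- ===== SOURCE B (Python) =====
-- def build_opacity_masks(texture, texture_size, transparent_index=0x21):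
--     """Build per-column 16-bit opacity masks (bit y == 1 means opaque)."""
--     width, height = texture_size
--     masks = [0] * max(width, 0)
--     for y in range(height):
--         row = texture[y * width : (y + 1) * width]
--         masks = [m | ((p != transparent_index) << y) for m, p in zip(masks, row)]
--     return masks
-- ===== Notes on version B (the rewrite author's own statement) =====
-- stated objective: alternative
-- what changed: Replaces A's column-outer/row-inner nested index loops (each column mask built independently by scalar bit accumulation) with a row-wise vector pass: slice each row of the texture and OR its per-pixel bit contributions elementwise into the whole mask list via zip, so there is no inner per-column loop and no index arithmetic.
import Mathlib
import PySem

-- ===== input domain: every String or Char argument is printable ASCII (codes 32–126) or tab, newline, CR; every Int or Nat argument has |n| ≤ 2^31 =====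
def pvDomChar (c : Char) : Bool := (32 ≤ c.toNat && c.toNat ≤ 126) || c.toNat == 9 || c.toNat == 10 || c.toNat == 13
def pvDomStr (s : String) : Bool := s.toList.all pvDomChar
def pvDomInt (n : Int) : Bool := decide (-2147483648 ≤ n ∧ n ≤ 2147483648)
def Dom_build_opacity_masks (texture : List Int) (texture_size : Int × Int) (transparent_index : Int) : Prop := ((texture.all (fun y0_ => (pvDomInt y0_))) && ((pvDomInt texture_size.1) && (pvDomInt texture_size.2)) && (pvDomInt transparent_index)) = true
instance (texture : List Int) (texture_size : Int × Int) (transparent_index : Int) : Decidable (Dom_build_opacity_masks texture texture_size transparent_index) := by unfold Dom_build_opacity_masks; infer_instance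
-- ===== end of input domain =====

-- B replaces A's column-outer/row-inner nested index loops by a row-wise vector pass:
-- each texture row is sliced out and OR-ed elementwise (zip) into the whole mask list (alternative decomposition, same cost).


-- ===== PORT A =====
def build_opacity_masks (texture : List Int) (texture_size : Int × Int) (transparent_index : Int) : List Int :=
  let width := texture_size.1
  let height := texture_size.2
  (PySem.List.pyRange 0 width 1).foldl (fun masks x =>
    masks ++ [(PySem.List.pyRange 0 height 1).foldl (fun mask y =>
      match PySem.List.pyGet? texture (y * width + x) with
      | some pixel => if pixel ≠ transparent_index then PySem.Int.bor mask ((1 : Int) <<< y.toNat) else mask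
      | none => mask  -- IndexError in Python; excluded by Pre_
      ) 0]) []

-- ===== PORT B =====
def build_opacity_masks_alt (texture : List Int) (texture_size : Int × Int) (transparent_index : Int) : List Int :=
  let width := texture_size.1
  let height := texture_size.2
  (PySem.List.pyRange 0 height 1).foldl (fun masks y =>
    let row := PySem.List.slice texture (some (y * width)) (some ((y + 1) * width))
    (masks.zip row).map (fun mp =>
      PySem.Int.bor mp.1 ((if mp.2 ≠ transparent_index then (1 : Int) else 0) <<< y.toNat)))
    (List.replicate (max width 0).toNat 0)

-- ===== PRECONDITION & SPEC =====
-- Pre_ excludes exactly the inputs on which Python A raises IndexError (texture shorter than width*height with both positive).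
def Pre_build_opacity_masks (texture : List Int) (texture_size : Int × Int) (transparent_index : Int) : Prop :=
  texture_size.1 ≤ 0 ∨ texture_size.2 ≤ 0 ∨ texture_size.1 * texture_size.2 ≤ (texture.length : Int)
instance (texture : List Int) (texture_size : Int × Int) (transparent_index : Int) : Decidable (Pre_build_opacity_masks texture texture_size transparent_index) := by unfold Pre_build_opacity_masks; infer_instance

def pvWitness_build_opacity_masks : List Int × (Int × Int) × Int := ([5, 33], (2, 1), 33)

def Spec_build_opacity_masks (texture : List Int) (texture_size : Int × Int) (transparent_index : Int) (out : List Int) : Prop := out = build_opacity_masks_alt texture texture_size transparent_index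
instance (texture : List Int) (texture_size : Int × Int) (transparent_index : Int) (out : List Int) : Decidable (Spec_build_opacity_masks texture texture_size transparent_index out) := by unfold Spec_build_opacity_masks; infer_instance

-- ===== CLAIM (what is proved, stated in full; the proofs are below) =====
def Claim_equal_build_opacity_masks : Prop := ∀ (texture : List Int) (texture_size : Int × Int) (transparent_index : Int), Dom_build_opacity_masks texture texture_size transparent_index → Pre_build_opacity_masks texture texture_size transparent_index → Spec_build_opacity_masks texture texture_size transparent_index (build_opacity_masks texture texture_size transparent_index)

-- ===== LEMMAS AND PROOFS =====

-- Partial column mask after the first k rows (shared characterisation of both loops).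
def pvPm (texture : List Int) (ti : Int) (W x : Nat) : Nat → Int
  | 0 => 0
  | k + 1 =>
      match PySem.List.pyGet? texture ((k : Int) * (W : Int) + (x : Int)) with
      | some pixel => if pixel ≠ ti then PySem.Int.bor (pvPm texture ti W x k) ((1 : Int) <<< k) else pvPm texture ti W x k
      | none => pvPm texture ti W x k

theorem pv_inner_eq (texture : List Int) (ti : Int) (W x : Nat) (k : Nat) :
    (List.range k).foldl (fun (mask : Int) (y : Nat) =>
      match PySem.List.pyGet? texture ((y : Int) * (W : Int) + (x : Int)) with
      | some pixel => if pixel ≠ ti then PySem.Int.bor mask ((1 : Int) <<< y) else mask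
      | none => mask) 0 = pvPm texture ti W x k := by
  induction k with
  | zero => simp [pvPm]
  | succ k ih =>
      rw [List.range_succ, List.foldl_append, List.foldl_cons, List.foldl_nil, ih]
      rfl

theorem pv_A_eq (texture : List Int) (ti : Int) (W H : Nat) :
    build_opacity_masks texture ((W : Int), (H : Int)) ti =
      (List.range W).map (fun x => pvPm texture ti W x H) := by
  unfold build_opacity_masks
  simp only [PySem.List.pyRange_zero_natCast, List.foldl_map,
    PySem.List.foldl_append_singleton_eq_map, List.nil_append]
  apply List.map_congr_left
  intro x _
  rw [← pv_inner_eq texture ti W x H]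
  simp

-- B's row step, in Nat form.
def pvRowStep (texture : List Int) (ti : Int) (W : Nat) (masks : List Int) (y : Nat) : List Int :=
  (masks.zip ((texture.drop (y * W)).take W)).map (fun mp =>
    PySem.Int.bor mp.1 ((if mp.2 ≠ ti then (1 : Int) else 0) <<< y))

theorem pv_B_eq (texture : List Int) (ti : Int) (W H : Nat) :
    build_opacity_masks_alt texture ((W : Int), (H : Int)) ti =
      (List.range H).foldl (pvRowStep texture ti W) (List.replicate W 0) := by
  unfold build_opacity_masks_alt pvRowStep
  simp only [PySem.List.pyRange_zero_natCast, List.foldl_map]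
  have hmax : (max (W : Int) 0).toNat = W := by omega
  rw [hmax]
  apply PySem.List.foldl_congr_mem
  intro masks y _
  have hcast : ((y : Int) + 1) * (W : Int) = (((y * W + W : Nat)) : Int) := by push_cast; ring
  have hcast2 : (y : Int) * (W : Int) = (((y * W : Nat)) : Int) := by push_cast; ring
  rw [hcast, hcast2, PySem.List.slice_natCast]
  simp

theorem pv_row_step_eq (texture : List Int) (ti : Int) (W k : Nat)
    (hlen : k * W + W ≤ texture.length) :
    pvRowStep texture ti W ((List.range W).map (fun x => pvPm texture ti W x k)) k =
      (List.range W).map (fun x => pvPm texture ti W x (k + 1)) := by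
  unfold pvRowStep
  have hrowlen : ((texture.drop (k * W)).take W).length = W := by
    simp; omega
  apply List.ext_getElem
  · simp [hrowlen]
  · intro x hx1 hx2
    have hxW : x < W := by simpa using hx2
    have hidx : k * W + x < texture.length := by omega
    simp only [List.getElem_map, List.getElem_zip, List.getElem_range,
      List.getElem_take, List.getElem_drop]
    show PySem.Int.bor (pvPm texture ti W x k)
        ((if texture[k * W + x] ≠ ti then (1 : Int) else 0) <<< k) = pvPm texture ti W x (k + 1)
    have hget : PySem.List.pyGet? texture ((k : Int) * (W : Int) + (x : Int)) = some texture[k * W + x] := by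
      have : (k : Int) * (W : Int) + (x : Int) = ((k * W + x : Nat) : Int) := by push_cast; ring
      rw [this, PySem.List.pyGet?_natCast, List.getElem?_eq_getElem hidx]
    show _ = pvPm texture ti W x (k + 1)
    rw [show pvPm texture ti W x (k + 1) =
      match PySem.List.pyGet? texture ((k : Int) * (W : Int) + (x : Int)) with
      | some pixel => if pixel ≠ ti then PySem.Int.bor (pvPm texture ti W x k) ((1 : Int) <<< k) else pvPm texture ti W x k
      | none => pvPm texture ti W x k from rfl]
    rw [hget]
    by_cases hp : texture[k * W + x] = ti
    · simp [hp]
    · simp [hp]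

theorem pv_fold_eq (texture : List Int) (ti : Int) (W H : Nat)
    (hlen : W * H ≤ texture.length) :
    ∀ k, k ≤ H →
      (List.range k).foldl (pvRowStep texture ti W) (List.replicate W 0) =
        (List.range W).map (fun x => pvPm texture ti W x k) := by
  intro k
  induction k with
  | zero =>
      intro _
      apply List.ext_getElem (by simp)
      intro j hj _
      simp [pvPm]
  | succ k ih =>
      intro hk
      rw [List.range_succ, List.foldl_append, List.foldl_cons, List.foldl_nil, ih (by omega)]
      exact pv_row_step_eq texture ti W k (by nlinarith)

theorem pv_step_nil (texture : List Int) (ti : Int) (width : Int) (l : List Int) :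
    l.foldl (fun masks y =>
      (masks.zip (PySem.List.slice texture (some (y * width)) (some ((y + 1) * width)))).map
        (fun mp => PySem.Int.bor mp.1 ((if mp.2 ≠ ti then (1 : Int) else 0) <<< y.toNat)))
      ([] : List Int) = [] := by
  induction l with
  | nil => rfl
  | cons a l ih => simpa using ih

-- ===== VERDICT (by name: the statement is the Claim_ definition above) =====
theorem build_opacity_masks_spec : Claim_equal_build_opacity_masks := by
  intro texture ts ti _ hpre
  obtain ⟨width, height⟩ := ts
  unfold Spec_build_opacity_masks
  by_cases hw : width ≤ 0
  · have hmax : (max width 0).toNat = 0 := by omega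
    simp only [build_opacity_masks, build_opacity_masks_alt, hmax,
      PySem.List.pyRange_one_eq_nil hw, List.foldl_nil, List.replicate_zero]
    rw [pv_step_nil]
  · have hW0 : 0 < width.toNat := by omega
    have hwW : width = (width.toNat : Int) := by omega
    by_cases hh : height ≤ 0
    · have hmax : (max width 0).toNat = width.toNat := by omega
      simp only [build_opacity_masks, build_opacity_masks_alt, hmax,
        PySem.List.pyRange_one_eq_nil hh, List.foldl_nil,
        PySem.List.foldl_append_singleton_eq_map, List.nil_append]
      apply List.ext_getElem (by simp [PySem.List.length_pyRange_one])
      intro j hj _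
      simp
    · have hH0 : 0 < height.toNat := by omega
      have hhH : height = (height.toNat : Int) := by omega
      have hlen : width.toNat * height.toNat ≤ texture.length := by
        rcases hpre with h | h | h
        · omega
        · omega
        · have : (width.toNat : Int) * (height.toNat : Int) ≤ (texture.length : Int) := by
            rw [← hwW, ← hhH]; exact h
          exact_mod_cast this
      rw [show ((width, height) : Int × Int) = ((width.toNat : Int), (height.toNat : Int)) from by
        rw [← hwW, ← hhH]]
      rw [pv_A_eq, pv_B_eq, pv_fold_eq texture ti _ _ hlen height.toNat (le_refl _)]
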